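-- pv_equiv track=rewrite | github.com/unamark/Domaci | Druga nedelja/domaci2.py | rezervacija_bioskop
-- ===== SOURCE A (Python) =====
-- def rezervacija_bioskop(slobodno, n):
--     potrebno = 0
--     for i in sorted(slobodno, reverse=True):
--         if n - i <= 0:
--             potrebno += 1
--             break
--         elif n - i > 0:
--             potrebno += 1
--             n = n-i
--     return potrebno
-- ===== SOURCE B (Python) =====
-- def rezervacija_bioskop(slobodno, n):
--     # selection instead of sorting: repeatedly extract the current maximum
--     rest = list(slobodno)
--     potrebno = 0
--     while rest:
--         m = max(rest)
--         rest.remove(m)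
--         potrebno += 1
--         if n - m <= 0:
--             return potrebno
--         n -= m
--     return potrebno
-- ===== Notes on version B (the rewrite author's own statement) =====
-- stated objective: alternative
-- what changed: B never sorts: it keeps the pool of free rows and repeatedly extracts the current maximum with max()+remove() until the request is covered (selection), where A sorts descending once and scans with a break-loop.
import Mathlib
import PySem

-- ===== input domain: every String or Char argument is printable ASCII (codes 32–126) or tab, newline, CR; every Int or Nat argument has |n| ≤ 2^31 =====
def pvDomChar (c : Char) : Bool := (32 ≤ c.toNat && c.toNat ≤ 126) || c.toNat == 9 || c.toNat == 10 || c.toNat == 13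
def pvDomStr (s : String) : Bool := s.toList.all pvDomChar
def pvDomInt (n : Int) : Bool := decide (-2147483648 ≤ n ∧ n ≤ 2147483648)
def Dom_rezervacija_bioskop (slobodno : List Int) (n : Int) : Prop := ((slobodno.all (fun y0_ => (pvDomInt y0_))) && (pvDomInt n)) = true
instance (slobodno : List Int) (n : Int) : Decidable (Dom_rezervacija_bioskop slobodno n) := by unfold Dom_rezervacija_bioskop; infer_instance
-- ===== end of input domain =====

-- B never sorts: it repeatedly extracts the current maximum from the remaining pool
-- (selection) where A sorts descending once and scans (objective: alternative).

-- ===== PORT A =====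
-- the for-loop with break: state (potrebno, n), recursing over the sorted list
def pvLoopA (xs : List Int) (n : Int) (potrebno : Int) : Int :=
  match xs with
  | [] => potrebno
  | i :: t =>
    if n - i ≤ 0 then potrebno + 1
    else pvLoopA t (n - i) (potrebno + 1)

def rezervacija_bioskop (slobodno : List Int) (n : Int) : Int :=
  pvLoopA (PySem.List.sorted slobodno (fun x => x) true) n 0

-- ===== PORT B =====
-- termination helper for the while-loop: rest.remove(m) shrinks the pool
theorem pvRemove?_length {xs : List Int} {v : Int} {ys : List Int}
    (h : PySem.List.remove? xs v = some ys) : ys.length < xs.length := by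
  induction xs generalizing ys with
  | nil => simp [PySem.List.remove?] at h
  | cons x t ih =>
    by_cases hx : x = v
    · subst hx; rw [PySem.List.remove?_cons_self] at h
      cases h; simp
    · rw [PySem.List.remove?_cons_of_ne t hx] at h
      cases hr : PySem.List.remove? t v with
      | none => rw [hr] at h; simp at h
      | some zs =>
        rw [hr] at h; simp at h
        subst h; simpa using Nat.succ_lt_succ (ih hr)

-- the while-loop: state (rest, n, potrebno); m = max(rest); rest.remove(m)
def pvLoopB (rest : List Int) (n : Int) (potrebno : Int) : Int :=
  match PySem.List.max? rest (fun x => x) with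
  | none => potrebno                    -- while rest: pool exhausted
  | some m =>
    match hr : PySem.List.remove? rest m with
    | none => potrebno                  -- unreachable: max(rest) ∈ rest
    | some rest' =>
      if n - m ≤ 0 then potrebno + 1
      else pvLoopB rest' (n - m) (potrebno + 1)
termination_by rest.length
decreasing_by exact pvRemove?_length hr

def rezervacija_bioskop_alt (slobodno : List Int) (n : Int) : Int :=
  pvLoopB slobodno n 0

-- ===== PRECONDITION & SPEC =====
def Spec_rezervacija_bioskop (slobodno : List Int) (n : Int) (out : Int) : Prop := out = rezervacija_bioskop_alt slobodno n
instance (slobodno : List Int) (n : Int) (out : Int) : Decidable (Spec_rezervacija_bioskop slobodno n out) := by unfold Spec_rezervacija_bioskop; infer_instance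

-- ===== CLAIM (what is proved, stated in full; the proofs are below) =====
def Claim_equal_rezervacija_bioskop : Prop := ∀ (slobodno : List Int) (n : Int), Dom_rezervacija_bioskop slobodno n → Spec_rezervacija_bioskop slobodno n (rezervacija_bioskop slobodno n)

-- ===== LEMMAS AND PROOFS =====
-- the descending sorted order is the unique ≥-ordered rearrangement
theorem pvDescUnique {ys zs : List Int} (hp : ys.Perm zs)
    (h1 : ys.Pairwise (fun a b => b ≤ a)) (h2 : zs.Pairwise (fun a b => b ≤ a)) :
    ys = zs := by
  exact List.Perm.eq_of_pairwise (fun a b _ _ ha hb => le_antisymm hb ha) h1 h2 hp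

-- peeling the maximum off the descending sort
theorem pvSorted_cons_max {xs : List Int} {m : Int}
    (hm : PySem.List.max? xs (fun x => x) = some m) :
    PySem.List.sorted xs (fun x => x) true
      = m :: PySem.List.sorted (xs.erase m) (fun x => x) true := by
  have hmem : m ∈ xs := PySem.List.max?_mem hm
  have hmax : ∀ y ∈ xs, y ≤ m := fun y hy => PySem.List.max?_isMax hm y hy
  apply pvDescUnique
  · exact ((PySem.List.sorted_perm xs (fun x => x) true).trans
      (List.perm_cons_erase hmem)).trans
      (List.Perm.cons m (PySem.List.sorted_perm (xs.erase m) (fun x => x) true).symm)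
  · simpa using PySem.List.sorted_pairwise_rev (xs := xs) (key := fun x => x)
  · constructor
    · intro y hy
      exact hmax y (List.mem_of_mem_erase
        ((PySem.List.mem_sorted _ _ _ _).1 hy))
    · simpa using PySem.List.sorted_pairwise_rev (xs := xs.erase m) (key := fun x => x)

-- A's scan of the sorted list equals B's selection loop, step by step
theorem pvLoopA_eq_pvLoopB (k : Nat) : ∀ (xs : List Int), xs.length ≤ k → ∀ (n p : Int),
    pvLoopA (PySem.List.sorted xs (fun x => x) true) n p = pvLoopB xs n p := by
  induction k with
  | zero =>
    intro xs hk n p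
    have hx : xs = [] := List.eq_nil_of_length_eq_zero (Nat.le_zero.1 hk)
    subst hx
    rw [pvLoopB]
    rw [(PySem.List.sorted_eq_nil_iff ([] : List Int) (fun x => x) true).2 rfl]
    simp [pvLoopA, PySem.List.max?]
  | succ k ih =>
    intro xs hk n p
    cases hm : PySem.List.max? xs (fun x => x) with
    | none =>
      have hx : xs = [] := (PySem.List.max?_eq_none_iff _ _).1 hm
      subst hx
      rw [pvLoopB]
      rw [(PySem.List.sorted_eq_nil_iff ([] : List Int) (fun x => x) true).2 rfl]
      simp [pvLoopA, PySem.List.max?]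
    | some m =>
      have hmem : m ∈ xs := PySem.List.max?_mem hm
      have hr : PySem.List.remove? xs m = some (xs.erase m) :=
        PySem.List.remove?_eq_some_erase xs m hmem
      rw [pvSorted_cons_max hm, pvLoopB, hm]
      simp only [pvLoopA]
      by_cases hc : n - m ≤ 0
      · rw [if_pos hc]
        split
        · next heq => rw [hr] at heq; cases heq
        · next rest' heq =>
          rw [hr] at heq
          injection heq with heq'
          subst heq'
          rw [if_pos hc]
      · rw [if_neg hc]
        split
        · next heq => rw [hr] at heq; cases heq
        · next rest' heq =>
          rw [hr] at heq
          injection heq with heq'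
          subst heq'
          rw [if_neg hc]
          have hlen : (xs.erase m).length ≤ k := by
            have := List.length_erase_of_mem hmem
            omega
          exact ih (xs.erase m) hlen (n - m) (p + 1)

-- ===== VERDICT (by name: the statement is the Claim_ definition above) =====
theorem rezervacija_bioskop_spec : Claim_equal_rezervacija_bioskop := by
  intro slobodno n _
  unfold Spec_rezervacija_bioskop rezervacija_bioskop rezervacija_bioskop_alt
  exact pvLoopA_eq_pvLoopB slobodno.length slobodno (le_refl _) n 0
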